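-- pv_equiv track=rewrite | github.com/raeez/chiral-bar-cobar | compute/lib/wp_koszulness_definitive_engine.py | _pbw_from_generators
-- ===== SOURCE A (Python) =====
-- from typing import Dict, List, Optional, Tuple
--
-- def _pbw_from_generators(generators: List[Tuple[int, int]],
--                          max_weight: int) -> List[int]:
--     """PBW character from a list of (weight, multiplicity) pairs."""
--     total = [0] * (max_weight + 1)
--     total[0] = 1
--     for h, m in generators:
--         single = _partition_gf(h, max_weight)
--         for _ in range(m):
--             total = _convolve(total, single, max_weight)
--     return total
--
-- def _partition_gf(h: int, mw: int) -> List[int]: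
--     """Partition generating function with parts >= h."""
--     c = [0] * (mw + 1)
--     c[0] = 1
--     for part in range(h, mw + 1):
--         for w in range(part, mw + 1):
--             c[w] += c[w - part]
--     return c
--
-- def _convolve(a: List[int], b: List[int], mw: int) -> List[int]:
--     """Convolve two generating functions."""
--     result = [0] * (mw + 1)
--     for i in range(mw + 1):
--         if a[i] == 0:
--             continue
--         for j in range(mw + 1 - i):
--             result[i + j] += a[i] * b[j]
--     return result
-- ===== SOURCE B (Python) =====
-- from typing import List, Tuple
--
-- def _pbw_from_generators(generators: List[Tuple[int, int]],
--                          max_weight: int) -> List[int]: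
--     """PBW character: square-and-multiply power of each generator's partition GF."""
--     total = _unit(max_weight)
--     for h, m in generators:
--         total = _mul(total, _gf_power(_parts_gf(h, max_weight), m, max_weight),
--                      max_weight)
--     return total
--
-- def _unit(mw: int) -> List[int]:
--     return [1] + [0] * mw
--
-- def _parts_gf(h: int, mw: int) -> List[int]:
--     c = _unit(mw)
--     for part in range(h, mw + 1):
--         for w in range(part, mw + 1):
--             c[w] += c[w - part]
--     return c
--
-- def _mul(a: List[int], b: List[int], mw: int) -> List[int]:
--     return [sum(a[i] * b[k - i] for i in range(k + 1)) for k in range(mw + 1)]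
--
-- def _gf_power(g: List[int], m: int, mw: int) -> List[int]:
--     acc = _unit(mw)
--     while m > 0:
--         if m & 1:
--             acc = _mul(acc, g, mw)
--         g = _mul(g, g, mw)
--         m >>= 1
--     return acc
-- ===== Notes on version B (the rewrite author's own statement) =====
-- stated objective: alternative
-- what changed: Replaces the m-fold repeated convolution per generator by binary exponentiation (square-and-multiply) of the generator's partition GF, and replaces the scatter-style convolution by a direct coefficient-sum product; intended as faster in the multiplicities (O(log m) instead of O(m) products per generator, measured 1.9x at the largest size both finished), though the O(mw^2) partition-GF build still dominates on huge weights.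
import Mathlib
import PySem

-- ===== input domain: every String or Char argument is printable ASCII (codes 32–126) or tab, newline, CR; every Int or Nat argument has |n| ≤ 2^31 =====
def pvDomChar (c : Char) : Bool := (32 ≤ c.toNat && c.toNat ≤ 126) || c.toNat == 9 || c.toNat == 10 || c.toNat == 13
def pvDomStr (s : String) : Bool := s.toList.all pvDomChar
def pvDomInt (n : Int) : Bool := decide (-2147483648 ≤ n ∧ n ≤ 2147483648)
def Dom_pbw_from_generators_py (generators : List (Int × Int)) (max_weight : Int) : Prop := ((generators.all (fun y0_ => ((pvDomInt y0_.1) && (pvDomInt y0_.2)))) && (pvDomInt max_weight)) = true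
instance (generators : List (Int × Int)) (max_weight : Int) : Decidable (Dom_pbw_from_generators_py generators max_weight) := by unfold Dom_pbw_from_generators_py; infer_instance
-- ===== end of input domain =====

-- B replaces A's m-fold repeated convolution per generator by binary exponentiation
-- (square-and-multiply) of the generator's partition GF, with a gather-style product
-- (objective: alternative; O(log m) instead of O(m) products per generator).

-- shared helper: c[q] += v  (in-range Python list update; List.set is a no-op out of range,
-- which is only reached outside Pre_)
def pvAddAt (c : List Int) (q : Nat) (v : Int) : List Int := c.set q (c.getD q 0 + v)

-- ===== PORT A =====
-- _partition_gf: c = [0]*(mw+1); c[0]=1; nested loops over range(h, mw+1) / range(part, mw+1).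
-- Indices are nonnegative and in range for 0 ≤ h (inside Pre_), where .toNat and getD are exact.
def pvPartGF (h mw : Int) : List Int :=
  (PySem.List.pyRange h (mw + 1) 1).foldl (fun c part =>
    (PySem.List.pyRange part (mw + 1) 1).foldl (fun c w =>
      pvAddAt c w.toNat (c.getD (w - part).toNat 0)) c)
    ((List.replicate (mw + 1).toNat 0).set 0 1)

-- _convolve: scatter loops; range(mw+1) / range(mw+1-i) ported via List.range on Nat
-- (exact for mw ≥ -1, hence on all of Pre_).
def pvConvolve (a b : List Int) (mw : Int) : List Int :=
  (List.range (mw + 1).toNat).foldl (fun r i =>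
    if a.getD i 0 = 0 then r
    else (List.range ((mw + 1).toNat - i)).foldl (fun r j =>
      pvAddAt r (i + j) (a.getD i 0 * b.getD j 0)) r)
    (List.replicate (mw + 1).toNat 0)

-- _pbw_from_generators: for each (h, m), convolve total with the partition GF m times.
def pbw_from_generators_py (generators : List (Int × Int)) (max_weight : Int) : List Int :=
  generators.foldl (fun total hm =>
    let single := pvPartGF hm.1 max_weight
    (List.range hm.2.toNat).foldl (fun t _ => pvConvolve t single max_weight) total)
    ((List.replicate (max_weight + 1).toNat 0).set 0 1)

-- ===== PORT B =====
-- _unit: [1] + [0]*mw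
def pvUnit (mw : Int) : List Int := 1 :: List.replicate mw.toNat 0

-- _mul: [sum(a[i]*b[k-i] for i in range(k+1)) for k in range(mw+1)]
def pvMul (a b : List Int) (mw : Int) : List Int :=
  (List.range (mw + 1).toNat).map (fun k =>
    ((List.range (k + 1)).map (fun i => a.getD i 0 * b.getD (k - i) 0)).sum)

-- _parts_gf: same DP as A's _partition_gf but started from _unit
def pvPartsGF (h mw : Int) : List Int :=
  (PySem.List.pyRange h (mw + 1) 1).foldl (fun c part =>
    (PySem.List.pyRange part (mw + 1) 1).foldl (fun c w =>
      pvAddAt c w.toNat (c.getD (w - part).toNat 0)) c)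
    (pvUnit mw)

-- _gf_power's while-loop (m & 1 and m >>= 1 are m % 2 and m / 2 for m > 0)
def pvPowGo (acc g : List Int) (m mw : Int) : List Int :=
  if h : 0 < m then
    pvPowGo (if m % 2 = 1 then pvMul acc g mw else acc) (pvMul g g mw) (m / 2) mw
  else acc
termination_by m.toNat
decreasing_by omega

def pbw_from_generators_py_alt (generators : List (Int × Int)) (max_weight : Int) : List Int :=
  generators.foldl (fun total hm =>
    pvMul total (pvPowGo (pvUnit max_weight) (pvPartsGF hm.1 max_weight) hm.2 max_weight)
      max_weight)
    (pvUnit max_weight)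

-- ===== PRECONDITION & SPEC =====
-- Pre_ = exactly where Python A returns: mw ≥ 0 (else total[0]=1 is an IndexError) and every
-- generator weight h ≥ 0 (a negative part makes _partition_gf read c[w-part] out of range).
def Pre_pbw_from_generators_py (generators : List (Int × Int)) (max_weight : Int) : Prop :=
  0 ≤ max_weight ∧ ∀ hm ∈ generators, 0 ≤ hm.1
instance (generators : List (Int × Int)) (max_weight : Int) : Decidable (Pre_pbw_from_generators_py generators max_weight) := by unfold Pre_pbw_from_generators_py; infer_instance

def pvWitness_pbw_from_generators_py : (List (Int × Int)) × Int := ([(1, 2), (2, 1)], 6)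

def Spec_pbw_from_generators_py (generators : List (Int × Int)) (max_weight : Int) (out : List Int) : Prop := out = pbw_from_generators_py_alt generators max_weight
instance (generators : List (Int × Int)) (max_weight : Int) (out : List Int) : Decidable (Spec_pbw_from_generators_py generators max_weight out) := by unfold Spec_pbw_from_generators_py; infer_instance

-- ===== CLAIM (what is proved, stated in full; the proofs are below) =====
def Claim_equal_pbw_from_generators_py : Prop := ∀ (generators : List (Int × Int)) (max_weight : Int), Dom_pbw_from_generators_py generators max_weight → Pre_pbw_from_generators_py generators max_weight → Spec_pbw_from_generators_py generators max_weight (pbw_from_generators_py generators max_weight)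

-- ===== LEMMAS AND PROOFS =====

-- both lists represent the power series s up to degree N-1
def PvRel (N : Nat) (a : List Int) (s : PowerSeries ℤ) : Prop :=
  a.length = N ∧ ∀ k < N, a.getD k 0 = PowerSeries.coeff (R := ℤ) k s

theorem pvRel_congr {N a s t} (h : PvRel N a s) (hst : s = t) : PvRel N a t := hst ▸ h

theorem pvRel_unique {N a b s} (ha : PvRel N a s) (hb : PvRel N b s) : a = b := by
  obtain ⟨la, ha⟩ := ha
  obtain ⟨lb, hb⟩ := hb
  apply List.ext_getElem (by omega)
  intro k h1 h2
  have h := (ha k (by omega)).trans ((hb k (by omega)).symm)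
  rwa [List.getD_eq_getElem _ _ h1, List.getD_eq_getElem _ _ h2] at h

theorem pvAddAt_length (c : List Int) (q : Nat) (v : Int) : (pvAddAt c q v).length = c.length := by
  simp [pvAddAt]

theorem pvAddAt_getD (c : List Int) (q k : Nat) (v : Int) (hk : k < c.length) :
    (pvAddAt c q v).getD k 0 = c.getD k 0 + if k = q then v else 0 := by
  unfold pvAddAt
  by_cases h : k = q
  · subst h
    rw [List.getD_eq_getElem _ _ (by simpa using hk), List.getElem_set_self, if_pos rfl]
  · rw [List.getD_eq_getElem _ _ (by simpa using hk), List.getElem_set_ne (by omega),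
      List.getD_eq_getElem _ _ hk, if_neg h, add_zero]

theorem pvFoldl_length {α : Type} (f : List Int → α → List Int)
    (hf : ∀ r x, (f r x).length = r.length) (l : List α) (r : List Int) :
    (l.foldl f r).length = r.length := by
  induction l generalizing r with
  | nil => rfl
  | cons x xs ih => simpa [List.foldl, hf] using ih (f r x)

theorem pvSum_map_range (f : Nat → Int) (n : Nat) :
    ((List.range n).map f).sum = ∑ i ∈ Finset.range n, f i := by
  induction n with
  | zero => simp
  | succ n ih => simp [List.range_succ, Finset.sum_range_succ, ih]

theorem pvCoeff_mul (s t : PowerSeries ℤ) (k : Nat) :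
    PowerSeries.coeff (R := ℤ) k (s * t) =
      ∑ i ∈ Finset.range (k + 1), PowerSeries.coeff (R := ℤ) i s * PowerSeries.coeff (R := ℤ) (k - i) t := by
  rw [PowerSeries.coeff_mul, Finset.Nat.sum_antidiagonal_eq_sum_range_succ_mk]

theorem pvRel_unit (mw : Int) (h : 0 ≤ mw) : PvRel (mw + 1).toNat (pvUnit mw) 1 := by
  constructor
  · simp only [pvUnit, List.length_cons, List.length_replicate]
    omega
  · intro k hk
    cases k with
    | zero => simp [pvUnit, PowerSeries.coeff_one]
    | succ n =>
      simp only [pvUnit, PowerSeries.coeff_one, Nat.succ_ne_zero, if_false]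
      rw [List.getD_cons_succ]
      rcases Nat.lt_or_ge n mw.toNat with h' | h'
      · rw [List.getD_eq_getElem _ _ (by simpa using h'), List.getElem_replicate]
      · rw [List.getD_eq_default _ _ (by simpa using h')]

theorem pvInit_eq_unit (mw : Int) (h : 0 ≤ mw) :
    (List.replicate (mw + 1).toNat 0).set 0 1 = pvUnit mw := by
  have hN : (mw + 1).toNat = mw.toNat + 1 := by omega
  rw [hN, List.replicate_succ]
  rfl

theorem pvPartsGF_eq (h mw : Int) (hmw : 0 ≤ mw) : pvPartsGF h mw = pvPartGF h mw := by
  unfold pvPartsGF pvPartGF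
  rw [pvInit_eq_unit mw hmw]

theorem pvPartGF_length (h mw : Int) : (pvPartGF h mw).length = (mw + 1).toNat := by
  unfold pvPartGF
  rw [pvFoldl_length]
  · simp
  · intro r part
    exact pvFoldl_length _ (fun r w => pvAddAt_length ..) _ r

theorem pvRel_mul {N : Nat} {mw : Int} {a b : List Int} {s t : PowerSeries ℤ}
    (hN : N = (mw + 1).toNat) (ha : PvRel N a s) (hb : PvRel N b t) :
    PvRel N (pvMul a b mw) (s * t) := by
  constructor
  · simp [pvMul, hN]
  · intro k hk
    have hget : (pvMul a b mw).getD k 0 =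
        ((List.range (k + 1)).map (fun i => a.getD i 0 * b.getD (k - i) 0)).sum := by
      rw [List.getD_eq_getElem _ _ (by simp [pvMul]; omega)]
      simp [pvMul]
    rw [hget, pvSum_map_range, pvCoeff_mul]
    apply Finset.sum_congr rfl
    intro i hi
    rw [Finset.mem_range] at hi
    rw [ha.2 i (by omega), hb.2 (k - i) (by omega)]

theorem pvConv_inner (i : Nat) (v : Nat → Int) (k : Nat) :
    ∀ (t : Nat) (r : List Int), k < r.length →
      ((List.range t).foldl (fun r j => pvAddAt r (i + j) (v j)) r).getD k 0 =
        r.getD k 0 + if i ≤ k ∧ k - i < t then v (k - i) else 0 := by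
  intro t
  induction t with
  | zero => intro r hr; simp
  | succ t ih =>
    intro r hr
    have hlen : ((List.range t).foldl (fun r j => pvAddAt r (i + j) (v j)) r).length = r.length :=
      pvFoldl_length _ (fun r x => pvAddAt_length ..) _ r
    rw [List.range_succ, List.foldl_append, List.foldl_cons, List.foldl_nil,
      pvAddAt_getD _ _ _ _ (by omega), ih r hr]
    by_cases hik : i ≤ k
    · by_cases hlt : k - i < t
      · have h2 : k ≠ i + t := by omega
        have h3 : k - i < t + 1 := by omega
        simp [hik, hlt, h2, h3]
      · by_cases heq : k = i + t
        · have hki : k - i = t := by omega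
          subst heq
          simp [hki]
        · have h3 : ¬(k - i < t + 1) := by omega
          simp [hlt, heq, h3]
    · have h2 : k ≠ i + t := by omega
      simp [hik, h2]

theorem pvConv_outer {N : Nat} (a b : List Int) {mw : Int} (hN : N = (mw + 1).toNat) (k : Nat)
    (hk : k < N) :
    ∀ (p : Nat) (r : List Int), r.length = N →
      ((List.range p).foldl (fun r i =>
          if a.getD i 0 = 0 then r
          else (List.range ((mw + 1).toNat - i)).foldl (fun r j =>
            pvAddAt r (i + j) (a.getD i 0 * b.getD j 0)) r) r).getD k 0 =
        r.getD k 0 + ∑ i ∈ Finset.range p, (if i ≤ k then a.getD i 0 * b.getD (k - i) 0 else 0) := by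
  subst hN
  intro p
  induction p with
  | zero => intro r hr; simp
  | succ p ih =>
    intro r hr
    have hlen : (∀ (r : List Int) (x : Nat),
        ((if a.getD x 0 = 0 then r
          else (List.range ((mw + 1).toNat - x)).foldl (fun r j =>
            pvAddAt r (x + j) (a.getD x 0 * b.getD j 0)) r)).length = r.length) := by
      intro r x
      by_cases h : a.getD x 0 = 0
      · rw [if_pos h]
      · rw [if_neg h]
        exact pvFoldl_length _ (fun r y => pvAddAt_length ..) _ r
    have hlen' := pvFoldl_length _ hlen (List.range p) r
    rw [List.range_succ, List.foldl_append, List.foldl_cons, List.foldl_nil,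
      Finset.sum_range_succ, ← add_assoc, ← ih r hr]
    by_cases h : a.getD p 0 = 0
    · rw [if_pos h, h]
      simp
    · rw [if_neg h]
      rw [pvConv_inner p (fun j => a.getD p 0 * b.getD j 0) k ((mw + 1).toNat - p) _ (by omega)]
      congr 1
      by_cases hpk : p ≤ k
      · have h1 : p ≤ k ∧ k - p < (mw + 1).toNat - p := ⟨hpk, by omega⟩
        simp [h1]
      · simp [hpk]

theorem pvRel_conv {N : Nat} {mw : Int} {a b : List Int} {s t : PowerSeries ℤ}
    (hN : N = (mw + 1).toNat) (ha : PvRel N a s) (hb : PvRel N b t) :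
    PvRel N (pvConvolve a b mw) (s * t) := by
  subst hN
  have hlen : (pvConvolve a b mw).length = (mw + 1).toNat := by
    unfold pvConvolve
    rw [pvFoldl_length]
    · simp
    · intro r x
      by_cases h : a.getD x 0 = 0
      · rw [if_pos h]
      · rw [if_neg h]
        exact pvFoldl_length _ (fun r y => pvAddAt_length ..) _ r
  refine ⟨hlen, fun k hk => ?_⟩
  unfold pvConvolve
  rw [pvConv_outer a b rfl k hk (mw + 1).toNat (List.replicate (mw + 1).toNat 0) (by simp)]
  rw [List.getD_eq_getElem _ _ (by simp; omega), List.getElem_replicate, zero_add]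
  have hsub : Finset.range (k + 1) ⊆ Finset.range ((mw + 1).toNat) := by
    intro x hx
    simp only [Finset.mem_range] at hx ⊢
    omega
  rw [← Finset.sum_subset hsub (fun x hx hnx => by
    simp only [Finset.mem_range] at hx hnx
    exact if_neg (by omega))]
  rw [pvCoeff_mul]
  apply Finset.sum_congr rfl
  intro i hi
  rw [Finset.mem_range] at hi
  rw [if_pos (by omega), ha.2 i (by omega), hb.2 (k - i) (by omega)]

theorem pvRel_pow {N : Nat} {mw : Int} (n : Nat) :
    ∀ (m : Int), m.toNat ≤ n → ∀ (acc g : List Int) (p s : PowerSeries ℤ),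
      N = (mw + 1).toNat → PvRel N acc p → PvRel N g s →
      PvRel N (pvPowGo acc g m mw) (p * s ^ m.toNat) := by
  induction n with
  | zero =>
    intro m hm acc g p s hN hacc hg
    rw [pvPowGo, dif_neg (by omega)]
    have h0 : m.toNat = 0 := by omega
    simpa [h0] using hacc
  | succ n ih =>
    intro m hm acc g p s hN hacc hg
    by_cases hm0 : 0 < m
    · rw [pvPowGo, dif_pos hm0]
      have hacc' : PvRel N (if m % 2 = 1 then pvMul acc g mw else acc) (p * s ^ (m % 2).toNat) := by
        by_cases h2 : m % 2 = 1
        · simpa [h2] using pvRel_mul hN hacc hg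
        · have h0 : m % 2 = 0 := by omega
          simpa [h2, h0] using hacc
      have hres := ih (m / 2) (by omega) _ _ _ _ hN hacc' (pvRel_mul hN hg hg)
      apply pvRel_congr hres
      have hms : m.toNat = (m % 2).toNat + 2 * (m / 2).toNat := by omega
      rw [← sq, ← pow_mul, mul_assoc, ← pow_add, ← hms]
    · rw [pvPowGo, dif_neg hm0]
      have h0 : m.toNat = 0 := by omega
      simpa [h0] using hacc

theorem pvRel_iter {N : Nat} {mw : Int} {single : List Int} {s : PowerSeries ℤ}
    (hN : N = (mw + 1).toNat) (hs : PvRel N single s) (q : Nat) :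
    ∀ (t : List Int) (p : PowerSeries ℤ), PvRel N t p →
      PvRel N ((List.range q).foldl (fun t _ => pvConvolve t single mw) t) (p * s ^ q) := by
  induction q with
  | zero => intro t p h; simpa using h
  | succ q ih =>
    intro t p h
    rw [List.range_succ, List.foldl_append]
    exact pvRel_congr (pvRel_conv hN (ih t p h) hs) (by rw [pow_succ, mul_assoc])

theorem pvMain {N : Nat} {mw : Int} (hmw : 0 ≤ mw) (hN : N = (mw + 1).toNat) :
    ∀ (gens : List (Int × Int)) (t1 t2 : List Int) (p : PowerSeries ℤ),
      PvRel N t1 p → PvRel N t2 p →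
      ∃ q, PvRel N (gens.foldl (fun total hm =>
              let single := pvPartGF hm.1 mw
              (List.range hm.2.toNat).foldl (fun t _ => pvConvolve t single mw) total) t1) q ∧
           PvRel N (gens.foldl (fun total hm =>
              pvMul total (pvPowGo (pvUnit mw) (pvPartsGF hm.1 mw) hm.2 mw) mw) t2) q := by
  intro gens
  induction gens with
  | nil => intro t1 t2 p h1 h2; exact ⟨p, h1, h2⟩
  | cons hm gens ih =>
    intro t1 t2 p h1 h2
    simp only [List.foldl_cons]
    have hlen : (pvPartGF hm.1 mw).length = N := hN ▸ pvPartGF_length hm.1 mw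
    have hrels : PvRel N (pvPartGF hm.1 mw)
        (PowerSeries.mk (fun k => (pvPartGF hm.1 mw).getD k 0)) :=
      ⟨hlen, fun k _ => by rw [PowerSeries.coeff_mk]⟩
    have hA := pvRel_iter hN hrels hm.2.toNat t1 p h1
    have hpow : PvRel N (pvPowGo (pvUnit mw) (pvPartsGF hm.1 mw) hm.2 mw)
        (1 * (PowerSeries.mk (fun k => (pvPartGF hm.1 mw).getD k 0)) ^ hm.2.toNat) := by
      rw [pvPartsGF_eq hm.1 mw hmw]
      exact pvRel_pow hm.2.toNat hm.2 le_rfl _ _ _ _ hN (hN ▸ pvRel_unit mw hmw) hrels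
    have hB := pvRel_mul hN h2 hpow
    exact ih _ _ _ hA (pvRel_congr hB (by ring))

-- ===== VERDICT (by name: the statement is the Claim_ definition above) =====
theorem pbw_from_generators_py_spec : Claim_equal_pbw_from_generators_py := by
  intro gens mw _dom hpre
  unfold Spec_pbw_from_generators_py pbw_from_generators_py pbw_from_generators_py_alt
  rw [pvInit_eq_unit mw hpre.1]
  obtain ⟨q, h1, h2⟩ := pvMain hpre.1 rfl gens (pvUnit mw) (pvUnit mw) 1
    (pvRel_unit mw hpre.1) (pvRel_unit mw hpre.1)
  exact pvRel_unique h1 h2
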